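-- pv_equiv track=rewrite | github.com/SaimLam/RobotTool | src/comau_extract/extract_move.py | _extract_cod_lines
-- ===== SOURCE A (Python) =====
-- from typing import List, Union
--
-- def _extract_cod_lines(cod_text: str) -> List[list[str]]:
--     lines: List[str] = cod_text.split("\n")
--     move_list: List[list[str]] = []
--     move_lines: List[str] = []
--     for line in lines:
--         line: str = line.strip()
--         if line.startswith(("MOVE", "MOVEFLY")):
--             if move_lines:
--                 move_list.append(move_lines)
--                 move_lines = []
--             move_lines.append(line)
--         elif line.startswith(("WITH", "ENDMOVE")):
--             move_lines.append(line)
--     return move_list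
-- ===== SOURCE B (Python) =====
-- def _blocks(xs):
--     if not xs:
--         return []
--     i = 1
--     while i < len(xs) and not xs[i].startswith(("MOVE", "MOVEFLY")):
--         i += 1
--     return [xs[:i]] + _blocks(xs[i:])
--
-- def _extract_cod_lines(cod_text: str):
--     filtered = [s for s in (l.strip() for l in cod_text.split("\n"))
--                 if s.startswith(("MOVE", "MOVEFLY", "WITH", "ENDMOVE"))]
--     return _blocks(filtered)[:-1]
-- ===== Notes on version B (the rewrite author's own statement) =====
-- stated objective: alternative
-- what changed: A builds blocks in one stateful loop that flushes a running accumulator at each MOVE line; B first filters the stripped lines down to the MOVE/MOVEFLY/WITH/ENDMOVE ones, then recursively splits that list into blocks at each MOVE line and drops the final block.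
import Mathlib
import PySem

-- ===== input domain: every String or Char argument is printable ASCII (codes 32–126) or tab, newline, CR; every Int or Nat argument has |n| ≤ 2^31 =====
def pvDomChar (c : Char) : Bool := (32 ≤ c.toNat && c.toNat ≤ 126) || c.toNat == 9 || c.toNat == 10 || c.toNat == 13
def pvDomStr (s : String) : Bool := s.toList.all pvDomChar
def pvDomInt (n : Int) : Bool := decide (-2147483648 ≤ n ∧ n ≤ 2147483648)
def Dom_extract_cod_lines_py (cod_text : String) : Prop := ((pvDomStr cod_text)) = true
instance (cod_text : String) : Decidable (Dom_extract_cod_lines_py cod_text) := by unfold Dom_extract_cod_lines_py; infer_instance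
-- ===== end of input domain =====

-- One honest line: B replaces A's single stateful accumulate-and-flush loop by a
-- filter pass followed by recursive splitting of the kept lines at each MOVE line
-- (dropping the final block, as A does); objective: alternative decomposition, same cost.

-- ===== PORT A =====
-- A-side helpers: the two branch predicates and the loop body of A's for-loop
-- (strip, then the branch cascade).
def pvIsMove (s : String) : Bool :=
  PySem.Str.startswith s "MOVE" || PySem.Str.startswith s "MOVEFLY"   -- line.startswith(("MOVE", "MOVEFLY"))

def pvIsWith (s : String) : Bool :=
  PySem.Str.startswith s "WITH" || PySem.Str.startswith s "ENDMOVE"   -- line.startswith(("WITH", "ENDMOVE"))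

def pvAStepCore (st : List (List String) × List String) (line : String) :
    List (List String) × List String :=
  if pvIsMove line then
    let st := if st.2 ≠ [] then (st.1 ++ [st.2], ([] : List String)) else st
    (st.1, st.2 ++ [line])
  else if pvIsWith line then
    (st.1, st.2 ++ [line])
  else st

def pvAStep (st : List (List String) × List String) (line : String) :
    List (List String) × List String :=
  pvAStepCore st (PySem.Str.strip line)

def extract_cod_lines_py (cod_text : String) : List (List String) :=
  let lines := (PySem.Str.split? cod_text "\n").getD []   -- sep "\n" ≠ "", so split? is always some
  (lines.foldl pvAStep (([] : List (List String)), ([] : List String))).1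

-- ===== PORT B =====
def pvKeep (s : String) : Bool := pvIsMove s || pvIsWith s   -- startswith(("MOVE","MOVEFLY","WITH","ENDMOVE"))

-- Source B's _blocks: its while loop scans past the non-MOVE lines following xs[0]
-- (= takeWhile/dropWhile of ¬pvIsMove), takes them as one block, recurses on the rest.
def pvBlocks : List String → List (List String)
  | [] => []
  | x :: rest =>
      (x :: rest.takeWhile (fun s => !pvIsMove s)) ::
        pvBlocks (rest.dropWhile (fun s => !pvIsMove s))
termination_by xs => xs.length
decreasing_by
  simpa using Nat.lt_succ_of_le (List.length_dropWhile_le (fun s => !pvIsMove s) rest)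

def extract_cod_lines_py_alt (cod_text : String) : List (List String) :=
  let filtered := (((PySem.Str.split? cod_text "\n").getD []).map PySem.Str.strip).filter pvKeep
  (pvBlocks filtered).dropLast   -- xs[:-1]

-- ===== PRECONDITION & SPEC =====
def Spec_extract_cod_lines_py (cod_text : String) (out : List (List String)) : Prop := out = extract_cod_lines_py_alt cod_text
instance (cod_text : String) (out : List (List String)) : Decidable (Spec_extract_cod_lines_py cod_text out) := by unfold Spec_extract_cod_lines_py; infer_instance

-- ===== CLAIM (what is proved, stated in full; the proofs are below) =====
def Claim_equal_extract_cod_lines_py : Prop := ∀ (cod_text : String), Dom_extract_cod_lines_py cod_text → Spec_extract_cod_lines_py cod_text (extract_cod_lines_py cod_text)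

-- ===== LEMMAS AND PROOFS =====

lemma pvBlocks_cons (x : String) (rest : List String) :
    pvBlocks (x :: rest) =
      (x :: rest.takeWhile (fun s => !pvIsMove s)) ::
        pvBlocks (rest.dropWhile (fun s => !pvIsMove s)) := by
  rw [pvBlocks]

-- A's loop body with the strip already applied on a stripped list = pvAStepCore
lemma pvFoldA (L : List String) (st : List (List String) × List String) :
    L.foldl pvAStep st = (L.map PySem.Str.strip).foldl pvAStepCore st := by
  rw [List.foldl_map]
  rfl

-- lines failing pvKeep are no-ops for A's loop body
lemma pvAStepCore_of_not_keep (st : List (List String) × List String) (s : String)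
    (h : pvKeep s = false) : pvAStepCore st s = st := by
  simp only [pvKeep, Bool.or_eq_false_iff] at h
  simp [pvAStepCore, h.1, h.2]

-- folding A's core step equals folding over the pvKeep-filtered list
lemma pvFold_filter (xs : List String) (st : List (List String) × List String) :
    xs.foldl pvAStepCore st = (xs.filter pvKeep).foldl pvAStepCore st := by
  induction xs generalizing st with
  | nil => rfl
  | cons x xs ih =>
      cases h : pvKeep x with
      | true => simp [h, ih]
      | false => simp [h, pvAStepCore_of_not_keep _ _ h, ih]

-- main invariant: with a nonempty current block cur and only kept lines remaining, the
-- fold produces ml ++ dropLast of (cur extended by the leading non-MOVE lines, then the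
-- blocks of the rest)
lemma pvFold_blocks (xs : List String) (ml : List (List String)) (cur : List String)
    (hcur : cur ≠ []) (hK : ∀ s ∈ xs, pvKeep s = true) :
    (xs.foldl pvAStepCore (ml, cur)).1 =
      ml ++ ((cur ++ xs.takeWhile (fun s => !pvIsMove s)) ::
        pvBlocks (xs.dropWhile (fun s => !pvIsMove s))).dropLast := by
  induction xs generalizing ml cur with
  | nil => simp [pvBlocks]
  | cons x xs ih =>
      cases hm : pvIsMove x with
      | true =>
          have hstep : pvAStepCore (ml, cur) x = (ml ++ [cur], [x]) := by
            simp [pvAStepCore, hm, hcur]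
          have hrec := ih (ml ++ [cur]) [x] (by simp)
            (fun s hs => hK s (List.mem_cons_of_mem _ hs))
          simp only [List.foldl_cons, hstep, hrec]
          rw [List.takeWhile_cons, List.dropWhile_cons]
          simp only [hm, Bool.not_true, if_neg Bool.false_ne_true, pvBlocks_cons]
          simp [List.append_assoc]
      | false =>
          have hw : pvIsWith x = true := by
            have hk := hK x (List.mem_cons_self ..)
            simp only [pvKeep, hm, Bool.false_or] at hk
            exact hk
          have hstep : pvAStepCore (ml, cur) x = (ml, cur ++ [x]) := by
            simp [pvAStepCore, hm, hw]
          have hrec := ih ml (cur ++ [x]) (by simp)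
            (fun s hs => hK s (List.mem_cons_of_mem _ hs))
          simp only [List.foldl_cons, hstep, hrec]
          rw [List.takeWhile_cons, List.dropWhile_cons]
          simp [hm, List.append_assoc]

-- the whole loop over a list of kept lines = pvBlocks with the last block dropped
lemma pvFold_eq_blocks_dropLast (fs : List String) (hK : ∀ s ∈ fs, pvKeep s = true) :
    (fs.foldl pvAStepCore (([] : List (List String)), ([] : List String))).1 =
      (pvBlocks fs).dropLast := by
  cases fs with
  | nil => simp [pvBlocks]
  | cons x xs =>
      have hstep : pvAStepCore ([], []) x = ([], [x]) := by
        cases hm : pvIsMove x with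
        | true => simp [pvAStepCore, hm]
        | false =>
            have hw : pvIsWith x = true := by
              have hk := hK x (List.mem_cons_self ..)
              simp only [pvKeep, hm, Bool.false_or] at hk
              exact hk
            simp [pvAStepCore, hm, hw]
      have hrec := pvFold_blocks xs [] [x] (by simp)
        (fun s hs => hK s (List.mem_cons_of_mem _ hs))
      simp only [List.foldl_cons, hstep, hrec, pvBlocks_cons]
      simp

-- ===== VERDICT (by name: the statement is the Claim_ definition above) =====
theorem extract_cod_lines_py_spec : Claim_equal_extract_cod_lines_py := by
  intro cod_text _
  show (((PySem.Str.split? cod_text "\n").getD []).foldl pvAStep ([], [])).1 =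
    (pvBlocks ((((PySem.Str.split? cod_text "\n").getD []).map PySem.Str.strip).filter pvKeep)).dropLast
  rw [pvFoldA, pvFold_filter]
  exact pvFold_eq_blocks_dropLast _ (fun s hs => (List.mem_filter.mp hs).2)
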